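-- pv_equiv track=rewrite | github.com/Kalsoom2023/DSA-tasks | lab3/2023cs182/part3.py | MatAddPartial
-- ===== SOURCE A (Python) =====
-- def MatAddPartial(A, B, startingIndex, size):
--     firstrow, firstcol = startingIndex
--     result = [[0 for _ in range(len(A[0]))] for _ in range(len(A))]
--
--     for i in range(len(A)):
--         for j in range(len(A[0])):
--             result[i][j] = A[i][j]
--     for i in range(size):
--         for j in range(size):
--             result[firstrow + i][firstcol + j] += B[firstrow + i][firstcol + j]
--
--     return result
-- ===== SOURCE B (Python) =====
-- def MatAddPartial(A, B, startingIndex, size):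
--     firstrow, firstcol = startingIndex
--     width = len(A[0]) if A else 0
--     result = [row[:width] for row in A]
--     for i in range(firstrow, firstrow + size):
--         row = result[i]
--         seg = [a + b for a, b in zip(row[firstcol:firstcol + size],
--                                      B[i][firstcol:firstcol + size])]
--         result[i] = row[:firstcol] + seg + row[firstcol + size:]
--     return result
-- ===== Notes on version B (the rewrite author's own statement) =====
-- stated objective: alternative
-- what changed: Replaces A's cell-wise mutation passes (zero-init matrix, per-cell copy loop, per-cell += over the block) with whole-row operations: rows are copied by slicing, and each affected row is rebuilt once by splicing a zip-added segment between its unchanged head and tail slices, so there are no per-cell writes and no inner column loops.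
-- outside the precondition, e.g. on MatAddPartial([[1]], [[2]], (-1, -1), 1): A returns [[3]], B returns [[1]]
import Mathlib
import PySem

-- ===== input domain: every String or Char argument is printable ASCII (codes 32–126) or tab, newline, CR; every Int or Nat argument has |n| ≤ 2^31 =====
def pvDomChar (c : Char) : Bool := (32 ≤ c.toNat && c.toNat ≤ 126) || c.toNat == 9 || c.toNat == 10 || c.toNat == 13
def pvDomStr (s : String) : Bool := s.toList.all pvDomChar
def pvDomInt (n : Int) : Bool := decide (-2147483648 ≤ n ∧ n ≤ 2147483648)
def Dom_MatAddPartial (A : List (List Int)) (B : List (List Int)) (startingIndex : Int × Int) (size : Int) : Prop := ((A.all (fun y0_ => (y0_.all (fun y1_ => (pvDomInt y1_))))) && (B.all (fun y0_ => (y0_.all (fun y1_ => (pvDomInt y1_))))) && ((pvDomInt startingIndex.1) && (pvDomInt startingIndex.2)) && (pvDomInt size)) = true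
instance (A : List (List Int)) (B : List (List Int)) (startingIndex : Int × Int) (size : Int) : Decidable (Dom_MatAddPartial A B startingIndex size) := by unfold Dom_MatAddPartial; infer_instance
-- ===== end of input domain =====

-- B replaces A's cell-wise mutation passes by whole-row slice/splice operations
-- (rows copied by slicing; each affected row rebuilt once by splicing a zip-added
-- segment between its unchanged slices); objective: alternative.

-- ===== PORT A =====
-- m[i][j] as a value (index arithmetic valid under Pre_; the default only fires outside Pre_)
def pvGet2 (m : List (List Int)) (i j : Int) : Int :=
  PySem.List.pyGetD (PySem.List.pyGetD m i ([] : List Int)) j 0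

-- m[i][j] = v (valid under Pre_)
def pvSet2 (m : List (List Int)) (i j : Int) (v : Int) : List (List Int) :=
  PySem.List.pySetD m i (PySem.List.pySetD (PySem.List.pyGetD m i ([] : List Int)) j v)

def MatAddPartial (A : List (List Int)) (B : List (List Int)) (startingIndex : Int × Int) (size : Int) : List (List Int) :=
  let firstrow := startingIndex.1
  let firstcol := startingIndex.2
  let result := (PySem.List.pyRange 0 (PySem.List.len A) 1).map (fun _ =>
      (PySem.List.pyRange 0 (PySem.List.len (PySem.List.pyGetD A 0 ([] : List Int))) 1).map (fun _ => (0 : Int)))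
  let result := (PySem.List.pyRange 0 (PySem.List.len A) 1).foldl (fun res i =>
      (PySem.List.pyRange 0 (PySem.List.len (PySem.List.pyGetD A 0 ([] : List Int))) 1).foldl (fun res j =>
        pvSet2 res i j (pvGet2 A i j)) res) result
  let result := (PySem.List.pyRange 0 size 1).foldl (fun res i =>
      (PySem.List.pyRange 0 size 1).foldl (fun res j =>
        pvSet2 res (firstrow + i) (firstcol + j)
          (pvGet2 res (firstrow + i) (firstcol + j) + pvGet2 B (firstrow + i) (firstcol + j))) res) result
  result

-- ===== PORT B =====
def MatAddPartial_alt (A : List (List Int)) (B : List (List Int)) (startingIndex : Int × Int) (size : Int) : List (List Int) :=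
  let firstrow := startingIndex.1
  let firstcol := startingIndex.2
  let width : Int := if A.isEmpty then 0 else PySem.List.len (PySem.List.pyGetD A 0 ([] : List Int))
  let result := A.map (fun row => PySem.List.slice row none (some width))
  (PySem.List.pyRange firstrow (firstrow + size) 1).foldl (fun res i =>
    let row := PySem.List.pyGetD res i ([] : List Int)
    let seg := ((PySem.List.slice row (some firstcol) (some (firstcol + size))).zip
                (PySem.List.slice (PySem.List.pyGetD B i ([] : List Int)) (some firstcol) (some (firstcol + size)))).map
               (fun p => p.1 + p.2)
    PySem.List.pySetD res i
      (PySem.List.slice row none (some firstcol) ++ seg ++ PySem.List.slice row (some (firstcol + size)) none)) result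

-- ===== PRECONDITION & SPEC =====
-- Pre_ excludes exactly (a) inputs on which A raises IndexError (a row of A shorter
-- than row 0, or a positive-size sub-block that overruns A or B), and (b) negative
-- starting indices with positive size, which lie outside the task's natural domain
-- and on which A returns only through Python's negative-index wraparound accident.
def Pre_MatAddPartial (A : List (List Int)) (B : List (List Int)) (startingIndex : Int × Int) (size : Int) : Prop :=
  (∀ row ∈ A, (A.headD []).length ≤ row.length) ∧
  (size ≤ 0 ∨
    (0 ≤ startingIndex.1 ∧ 0 ≤ startingIndex.2 ∧
     startingIndex.1 + size ≤ (A.length : Int) ∧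
     startingIndex.2 + size ≤ ((A.headD []).length : Int) ∧
     startingIndex.1 + size ≤ (B.length : Int) ∧
     ∀ row ∈ (B.drop startingIndex.1.toNat).take size.toNat,
       startingIndex.2 + size ≤ (row.length : Int)))

instance (A : List (List Int)) (B : List (List Int)) (startingIndex : Int × Int) (size : Int) : Decidable (Pre_MatAddPartial A B startingIndex size) := by
  unfold Pre_MatAddPartial; infer_instance

def pvWitness_MatAddPartial : List (List Int) × List (List Int) × (Int × Int) × Int :=
  ([[1, 2], [3, 4]], [[10, 20], [30, 40]], (0, 1), 1)

def Spec_MatAddPartial (A : List (List Int)) (B : List (List Int)) (startingIndex : Int × Int) (size : Int) (out : List (List Int)) : Prop := out = MatAddPartial_alt A B startingIndex size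
instance (A : List (List Int)) (B : List (List Int)) (startingIndex : Int × Int) (size : Int) (out : List (List Int)) : Decidable (Spec_MatAddPartial A B startingIndex size out) := by unfold Spec_MatAddPartial; infer_instance

-- ===== CLAIM (what is proved, stated in full; the proofs are below) =====
def Claim_equal_MatAddPartial : Prop := ∀ (A : List (List Int)) (B : List (List Int)) (startingIndex : Int × Int) (size : Int), Dom_MatAddPartial A B startingIndex size → Pre_MatAddPartial A B startingIndex size → Spec_MatAddPartial A B startingIndex size (MatAddPartial A B startingIndex size)

-- ===== LEMMAS AND PROOFS =====

-- Nat-level forms of the cell read / write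
def pvG (m : List (List Int)) (i j : Nat) : Int := (m.getD i []).getD j 0
def pvS (m : List (List Int)) (i j : Nat) (v : Int) : List (List Int) :=
  m.set i ((m.getD i []).set j v)


-- the common entry-wise normal form both ports are reduced to
def altSpec (A B : List (List Int)) (fr fc size : Int) : List (List Int) :=
  (List.range A.length).map (fun i =>
    (List.range (A.headD []).length).map (fun j =>
      pvG A i j +
        (if fr ≤ (i : Int) ∧ (i : Int) < fr + size ∧ fc ≤ (j : Int) ∧ (j : Int) < fc + size
         then pvG B i j else 0)))

-- Nat-level normal form of one row-pass
def pvInner (r c : Nat) (w : Nat → Int → Int) (res : List (List Int)) (ccnt : Nat) : List (List Int) :=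
  (List.range ccnt).foldl (fun res j => pvS res r (c + j) (w j (pvG res r (c + j)))) res

def pvBlock (r0 c ccnt : Nat) (w : Nat → Nat → Int → Int) (res : List (List Int)) (rcnt : Nat) : List (List Int) :=
  (List.range rcnt).foldl (fun res i => pvInner (r0 + i) c (w i) res ccnt) res

theorem getD_zero_headD (A : List (List Int)) : A.getD 0 [] = A.headD [] := by
  cases A <;> rfl

theorem pvGet2_natCast (m : List (List Int)) (i j : Nat) : pvGet2 m (i : Int) (j : Int) = pvG m i j := by
  simp [pvGet2, pvG]

theorem pvSet2_natCast (m : List (List Int)) (i j : Nat) (v : Int) :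
    pvSet2 m (i : Int) (j : Int) v = pvS m i j v := by
  simp [pvSet2, pvS]

theorem getD_set_list (m : List (List Int)) (i : Nat) (row : List Int) (p : Nat) :
    (m.set i row).getD p [] = if i = p ∧ i < m.length then row else m.getD p [] := by
  by_cases h : i = p ∧ i < m.length
  · obtain ⟨h1, h2⟩ := h
    subst h1
    rw [if_pos ⟨rfl, h2⟩, List.getD_eq_getElem?_getD, List.getElem?_set]
    simp [h2]
  · rw [if_neg h]
    by_cases h1 : i = p
    · subst h1
      have h2 : m.length ≤ i := by omega
      rw [List.getD_eq_getElem?_getD, List.getD_eq_getElem?_getD,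
        List.getElem?_eq_none h2, List.getElem?_eq_none (by simpa using h2)]
    · simp [List.getD_eq_getElem?_getD, h1]

theorem pvS_length (m : List (List Int)) (i j : Nat) (v : Int) :
    (pvS m i j v).length = m.length := by
  simp [pvS]

theorem pvS_rowlen (m : List (List Int)) (i j : Nat) (v : Int) (p : Nat) :
    ((pvS m i j v).getD p []).length = ((m.getD p []).length) := by
  rw [pvS, getD_set_list]
  split_ifs with h
  · rw [h.1]; simp
  · rfl

theorem pvG_pvS (m : List (List Int)) (r k : Nat) (v : Int)
    (hr : r < m.length) (hk : k < (m.getD r []).length) (p q : Nat) :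
    pvG (pvS m r k v) p q = if p = r ∧ q = k then v else pvG m p q := by
  rw [pvG, pvS, getD_set_list]
  by_cases hp : p = r
  · subst hp
    rw [if_pos ⟨rfl, hr⟩]
    by_cases hq : q = k
    · subst hq
      rw [if_pos ⟨rfl, rfl⟩]
      simp only [List.getD_eq_getElem?_getD, List.getElem?_set] at hk ⊢
      split_ifs <;> rfl
    · rw [if_neg (by omega), pvG]
      simp only [List.getD_eq_getElem?_getD, List.getElem?_set] at hk ⊢
      split_ifs <;> first | rfl | omega
  · rw [if_neg (by omega), if_neg (by omega), pvG]

theorem pvInner_spec (r c ccnt : Nat) (w : Nat → Int → Int) (res : List (List Int))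
    (hr : r < res.length) (hc : c + ccnt ≤ (res.getD r []).length) :
    (pvInner r c w res ccnt).length = res.length ∧
    (∀ p, ((pvInner r c w res ccnt).getD p []).length = (res.getD p []).length) ∧
    (∀ p q, pvG (pvInner r c w res ccnt) p q =
      if p = r ∧ c ≤ q ∧ q < c + ccnt then w (q - c) (pvG res p q) else pvG res p q) := by
  induction ccnt with
  | zero =>
    refine ⟨rfl, fun p => rfl, fun p q => ?_⟩
    rw [if_neg (by omega)]; rfl
  | succ cnt ih =>
    obtain ⟨ih1, ih2, ih3⟩ := ih (by omega)
    have hM : pvInner r c w res (cnt + 1) =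
        pvS (pvInner r c w res cnt) r (c + cnt)
          (w cnt (pvG (pvInner r c w res cnt) r (c + cnt))) := by
      rw [pvInner, List.range_succ, List.foldl_append, List.foldl_cons, List.foldl_nil]
      rfl
    have hrM : r < (pvInner r c w res cnt).length := by rw [ih1]; exact hr
    have hkM : c + cnt < ((pvInner r c w res cnt).getD r []).length := by
      rw [ih2]; omega
    have hval : pvG (pvInner r c w res cnt) r (c + cnt) = pvG res r (c + cnt) := by
      rw [ih3, if_neg (by omega)]
    refine ⟨?_, ?_, ?_⟩
    · rw [hM, pvS_length, ih1]
    · intro p; rw [hM, pvS_rowlen, ih2]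
    · intro p q
      rw [hM, pvG_pvS _ _ _ _ hrM hkM, hval, ih3]
      by_cases hp : p = r
      · subst hp
        by_cases hq : q = c + cnt
        · subst hq
          rw [if_pos ⟨rfl, rfl⟩, if_pos (by omega), show c + cnt - c = cnt by omega]
        · by_cases hq2 : c ≤ q ∧ q < c + cnt
          · rw [if_neg (by omega), if_pos ⟨rfl, hq2.1, hq2.2⟩, if_pos (by omega)]
          · rw [if_neg (by omega), if_neg (by omega), if_neg (by omega)]
      · rw [if_neg (by omega), if_neg (by omega), if_neg (by omega)]

theorem pvBlock_spec (r0 c ccnt rcnt : Nat) (w : Nat → Nat → Int → Int) (res : List (List Int))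
    (hr : r0 + rcnt ≤ res.length)
    (hc : ∀ i, i < rcnt → c + ccnt ≤ (res.getD (r0 + i) []).length) :
    (pvBlock r0 c ccnt w res rcnt).length = res.length ∧
    (∀ p, ((pvBlock r0 c ccnt w res rcnt).getD p []).length = (res.getD p []).length) ∧
    (∀ p q, pvG (pvBlock r0 c ccnt w res rcnt) p q =
      if r0 ≤ p ∧ p < r0 + rcnt ∧ c ≤ q ∧ q < c + ccnt
      then w (p - r0) (q - c) (pvG res p q) else pvG res p q) := by
  induction rcnt with
  | zero =>
    refine ⟨rfl, fun p => rfl, fun p q => ?_⟩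
    rw [if_neg (by omega)]; rfl
  | succ cnt ih =>
    obtain ⟨ih1, ih2, ih3⟩ := ih (by omega) (fun i hi => hc i (by omega))
    have hM : pvBlock r0 c ccnt w res (cnt + 1) =
        pvInner (r0 + cnt) c (w cnt) (pvBlock r0 c ccnt w res cnt) ccnt := by
      rw [pvBlock, List.range_succ, List.foldl_append, List.foldl_cons, List.foldl_nil]
      rfl
    obtain ⟨in1, in2, in3⟩ := pvInner_spec (r0 + cnt) c ccnt (w cnt)
      (pvBlock r0 c ccnt w res cnt)
      (by rw [ih1]; omega)
      (by rw [ih2]; exact hc cnt (by omega))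
    refine ⟨?_, ?_, ?_⟩
    · rw [hM, in1, ih1]
    · intro p; rw [hM, in2, ih2]
    · intro p q
      rw [hM, in3, ih3]
      by_cases hp : p = r0 + cnt
      · subst hp
        by_cases hq : c ≤ q ∧ q < c + ccnt
        · rw [if_pos ⟨rfl, hq.1, hq.2⟩, if_neg (by omega), if_pos (by omega),
            show r0 + cnt - r0 = cnt by omega]
        · rw [if_neg (by omega), if_neg (by omega), if_neg (by omega)]
      · rw [if_neg (by omega)]
        by_cases hb : r0 ≤ p ∧ p < r0 + cnt ∧ c ≤ q ∧ q < c + ccnt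
        · rw [if_pos hb, if_pos (by omega)]
        · rw [if_neg (by omega), if_neg (by omega)]

-- Port A's three phases in Nat normal form
theorem phase0_eq (A : List (List Int)) :
    ((PySem.List.pyRange 0 (PySem.List.len A) 1).map (fun _ =>
      (PySem.List.pyRange 0 (PySem.List.len (PySem.List.pyGetD A 0 ([] : List Int))) 1).map (fun _ => (0 : Int))))
    = List.replicate A.length (List.replicate (A.headD []).length 0) := by
  rw [show PySem.List.len A = ((A.length : Int)) by simp,
      show PySem.List.pyGetD A 0 ([] : List Int) = A.headD [] by rw [PySem.List.pyGetD_zero, getD_zero_headD],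
      show PySem.List.len (A.headD []) = (((A.headD []).length : Int)) by simp,
      PySem.List.pyRange_zero_natCast, PySem.List.pyRange_zero_natCast]
  simp [Function.comp_def, List.map_const']

theorem phase1_eq (A : List (List Int)) (res : List (List Int)) :
    ((PySem.List.pyRange 0 (PySem.List.len A) 1).foldl (fun res i =>
      (PySem.List.pyRange 0 (PySem.List.len (PySem.List.pyGetD A 0 ([] : List Int))) 1).foldl (fun res j =>
        pvSet2 res i j (pvGet2 A i j)) res) res)
    = pvBlock 0 0 (A.headD []).length (fun i j _ => pvG A i j) res A.length := by
  rw [show PySem.List.len A = ((A.length : Int)) by simp,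
      show PySem.List.pyGetD A 0 ([] : List Int) = A.headD [] by rw [PySem.List.pyGetD_zero, getD_zero_headD],
      show PySem.List.len (A.headD []) = (((A.headD []).length : Int)) by simp,
      PySem.List.pyRange_zero_natCast, PySem.List.pyRange_zero_natCast, pvBlock]
  rw [List.foldl_map]
  refine List.foldl_ext _ _ _ ?_
  intro acc i _
  rw [List.foldl_map, pvInner]
  refine List.foldl_ext _ _ _ ?_
  intro acc2 j _
  simp only [Nat.zero_add]
  rw [pvSet2_natCast, pvGet2_natCast]

theorem phase2_eq (B : List (List Int)) (fr fc : Nat) (size : Int) (hsz : size = ((size.toNat : Nat) : Int))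
    (res : List (List Int)) :
    ((PySem.List.pyRange 0 size 1).foldl (fun res i =>
      (PySem.List.pyRange 0 size 1).foldl (fun res j =>
        pvSet2 res ((fr : Int) + i) ((fc : Int) + j)
          (pvGet2 res ((fr : Int) + i) ((fc : Int) + j) + pvGet2 B ((fr : Int) + i) ((fc : Int) + j))) res) res)
    = pvBlock fr fc size.toNat (fun i j old => old + pvG B (fr + i) (fc + j)) res size.toNat := by
  rw [hsz, PySem.List.pyRange_zero_natCast, pvBlock, List.foldl_map]
  refine List.foldl_ext _ _ _ ?_
  intro acc i _
  rw [List.foldl_map, pvInner]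
  refine List.foldl_ext _ _ _ ?_
  intro acc2 j _
  have h1 : (fr : Int) + (i : Int) = ((fr + i : Nat) : Int) := by push_cast; ring
  have h2 : (fc : Int) + (j : Int) = ((fc + j : Nat) : Int) := by push_cast; ring
  rw [h1, h2, pvSet2_natCast, pvGet2_natCast, pvGet2_natCast]

theorem replicate_getD (n m : Nat) (p : Nat) :
    ((List.replicate n (List.replicate m (0 : Int))).getD p []).length = if p < n then m else 0 := by
  split_ifs with h
  · rw [List.getD_eq_getElem?_getD, List.getElem?_replicate, if_pos h]; simp
  · rw [List.getD_eq_getElem?_getD, List.getElem?_eq_none (by simpa using h)]; rfl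

theorem map_range_getD {α : Type} (f : Nat → α) (n p : Nat) (d : α) :
    ((List.range n).map f).getD p d = if p < n then f p else d := by
  by_cases h : p < n
  · rw [if_pos h, List.getD_eq_getElem?_getD, List.getElem?_map,
      List.getElem?_range h]
    rfl
  · rw [if_neg h, List.getD_eq_getElem?_getD, List.getElem?_eq_none (by simpa using h)]
    rfl

theorem matrix_ext (X Y : List (List Int)) (hlen : X.length = Y.length)
    (hrow : ∀ p, (X.getD p []).length = (Y.getD p []).length)
    (hval : ∀ p q, p < X.length → q < (X.getD p []).length → pvG X p q = pvG Y p q) :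
    X = Y := by
  refine List.ext_getElem hlen ?_
  intro p h1 h2
  have hr : (X.getD p []) = X[p] := List.getD_eq_getElem X [] h1
  have hr' : (Y.getD p []) = Y[p] := List.getD_eq_getElem Y [] h2
  refine List.ext_getElem (by rw [← hr, ← hr', hrow p]) ?_
  intro q g1 g2
  have e1 : X[p][q] = pvG X p q := by rw [pvG, hr, List.getD_eq_getElem _ _ g1]
  have e2 : Y[p][q] = pvG Y p q := by rw [pvG, hr', List.getD_eq_getElem _ _ g2]
  rw [e1, e2]
  exact hval p q h1 (by rw [hr]; exact g1)

theorem alt_rowlen (g : Nat → Nat → Int) (n m p : Nat) :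
    ((((List.range n).map (fun i => (List.range m).map (g i)))).getD p []).length
      = if p < n then m else 0 := by
  rw [map_range_getD]
  split_ifs <;> simp

theorem alt_entry (g : Nat → Nat → Int) (n m p q : Nat) (hp : p < n) (hq : q < m) :
    pvG ((List.range n).map (fun i => (List.range m).map (g i))) p q = g p q := by
  rw [pvG, map_range_getD, if_pos hp, map_range_getD, if_pos hq]

-- A's port equals the entry-wise normal form, under Pre_
theorem Aport_eq_altSpec (A B : List (List Int)) (si : Int × Int) (size : Int)
    (hPre : Pre_MatAddPartial A B si size) :
    MatAddPartial A B si size = altSpec A B si.1 si.2 size := by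
  obtain ⟨_hRows, hBlk⟩ := hPre
  rw [altSpec]
  simp only [MatAddPartial]
  rw [phase0_eq, phase1_eq]
  set n := A.length with hn
  set m := (A.headD []).length with hm
  set Z := List.replicate n (List.replicate m (0 : Int)) with hZ
  obtain ⟨c1, c2, c3⟩ := pvBlock_spec 0 0 m n (fun i j _ => pvG A i j) Z
    (by rw [hZ]; simp)
    (by intro i hi
        rw [hZ, replicate_getD, if_pos (show 0 + i < n by omega)]
        omega)
  set C := pvBlock 0 0 m (fun i j _ => pvG A i j) Z n with hC
  have hClen : C.length = n := by rw [c1, hZ]; simp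
  have hCrow : ∀ p, ((C.getD p []).length) = if p < n then m else 0 := by
    intro p; rw [c2, hZ, replicate_getD]
  have hCval : ∀ p q, p < n → q < m → pvG C p q = pvG A p q := by
    intro p q hp hq
    rw [c3, if_pos (by omega), Nat.sub_zero, Nat.sub_zero]
  by_cases hsz : size ≤ 0
  · -- empty block: the second pass is a no-op and the guard is never true
    rw [PySem.List.pyRange_one_eq_nil hsz, List.foldl_nil]
    refine matrix_ext _ _ ?_ ?_ ?_
    · rw [hClen]; simp
    · intro p; rw [hCrow, alt_rowlen]
    · intro p q hp hq
      have hp' : p < n := by rwa [hClen] at hp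
      have hq' : q < m := by rw [hCrow, if_pos hp'] at hq; exact hq
      rw [hCval p q hp' hq', alt_entry _ n m p q hp' hq', if_neg (by omega), add_zero]
  · obtain ⟨hfr0, hfc0, hA1, hA2, _, _⟩ := hBlk.resolve_left hsz
    have hfr : si.1 = ((si.1.toNat : Nat) : Int) := by omega
    have hfc : si.2 = ((si.2.toNat : Nat) : Int) := by omega
    rw [hfr, hfc, phase2_eq B si.1.toNat si.2.toNat size (by omega)]
    obtain ⟨b1, b2, b3⟩ := pvBlock_spec si.1.toNat si.2.toNat size.toNat size.toNat
      (fun i j old => old + pvG B (si.1.toNat + i) (si.2.toNat + j)) C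
      (by rw [hClen]; omega)
      (by intro i hi; rw [hCrow, if_pos (by omega)]; omega)
    set R := pvBlock si.1.toNat si.2.toNat size.toNat
      (fun i j old => old + pvG B (si.1.toNat + i) (si.2.toNat + j)) C size.toNat with hR
    have hRlen : R.length = n := by rw [b1, hClen]
    have hRrow : ∀ p, ((R.getD p []).length) = if p < n then m else 0 := by
      intro p; rw [b2, hCrow]
    refine matrix_ext _ _ ?_ ?_ ?_
    · rw [hRlen]; simp
    · intro p; rw [hRrow, alt_rowlen]
    · intro p q hp hq
      have hp' : p < n := by rwa [hRlen] at hp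
      have hq' : q < m := by rw [hRrow, if_pos hp'] at hq; exact hq
      rw [b3, alt_entry _ n m p q hp' hq']
      by_cases hin : si.1.toNat ≤ p ∧ p < si.1.toNat + size.toNat ∧
          si.2.toNat ≤ q ∧ q < si.2.toNat + size.toNat
      · rw [if_pos hin, if_pos (by omega), hCval p q hp' hq',
          show si.1.toNat + (p - si.1.toNat) = p by omega,
          show si.2.toNat + (q - si.2.toNat) = q by omega]
      · rw [if_neg hin, if_neg (by omega), hCval p q hp' hq', add_zero]

-- ---- B-side lemmas ----

-- splice one row: head slice ++ zip-added segment ++ tail slice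
def pvSplice (row brow : List Int) (fc sz : Nat) : List Int :=
  row.take fc ++
    (((row.drop fc).take sz).zip ((brow.drop fc).take sz)).map (fun p => p.1 + p.2) ++
    row.drop (fc + sz)

def pvRowPass (fr fc sz : Nat) (Bm : List (List Int)) (res : List (List Int)) (k : Nat) : List (List Int) :=
  (List.range k).foldl (fun res i =>
    res.set (fr + i) (pvSplice (res.getD (fr + i) []) (Bm.getD (fr + i) []) fc sz)) res

theorem pvSplice_length (row brow : List Int) (fc sz : Nat)
    (hm : fc + sz ≤ row.length) (hb : fc + sz ≤ brow.length) :
    (pvSplice row brow fc sz).length = row.length := by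
  simp [pvSplice]
  omega

theorem pvSplice_getD (row brow : List Int) (fc sz : Nat)
    (hm : fc + sz ≤ row.length) (hb : fc + sz ≤ brow.length) (q : Nat) (hq : q < row.length) :
    (pvSplice row brow fc sz).getD q 0
      = row.getD q 0 + if fc ≤ q ∧ q < fc + sz then brow.getD q 0 else 0 := by
  have h1 : (row.take fc).length = fc := by simp; omega
  have h2 : ((((row.drop fc).take sz).zip ((brow.drop fc).take sz)).map
      (fun p : Int × Int => p.1 + p.2)).length = sz := by
    simp; omega
  have hrq : row.getD q 0 = row[q] := List.getD_eq_getElem row 0 hq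
  rw [pvSplice]
  by_cases hc1 : q < fc
  · rw [if_neg (by omega), add_zero,
      List.getD_eq_getElem?_getD, List.getElem?_append_left (by simp [h1, h2]; omega),
      List.getElem?_append_left (by omega), hrq]
    rw [List.getElem?_take_of_lt hc1, List.getElem?_eq_getElem hq]
    rfl
  · by_cases hc2 : q < fc + sz
    · rw [if_pos ⟨by omega, hc2⟩, List.getD_eq_getElem?_getD,
        List.getElem?_append_left (by simp [h1, h2]; omega),
        List.getElem?_append_right (by omega)]
      have hlt : q - fc < ((((row.drop fc).take sz).zip ((brow.drop fc).take sz))).length := by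
        simp; omega
      rw [h1, List.getElem?_map, List.getElem?_eq_getElem hlt]
      have hzip := List.getElem_zip (l := (row.drop fc).take sz) (l' := (brow.drop fc).take sz)
        (i := q - fc) (h := hlt)
      rw [Option.map_some, hzip]
      have e1 : ((row.drop fc).take sz)[q - fc]'(by simp; omega) = row[q] := by
        rw [List.getElem_take, List.getElem_drop]
        congr 1; omega
      have e2 : ((brow.drop fc).take sz)[q - fc]'(by simp; omega) = brow[q]'(by omega) := by
        rw [List.getElem_take, List.getElem_drop]
        congr 1; omega
      simp only [e1, e2]
      rw [hrq, List.getD_eq_getElem brow 0 (by omega)]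
      rfl
    · rw [if_neg (by omega), add_zero, List.getD_eq_getElem?_getD,
        List.getElem?_append_right (by simp [h1, h2]; omega),
        List.length_append, h1, h2]
      have hdl : q - (fc + sz) < (row.drop (fc + sz)).length := by simp; omega
      have e3 : (row.drop (fc + sz))[q - (fc + sz)]'hdl = row[q] := by
        rw [List.getElem_drop]
        congr 1; omega
      rw [List.getElem?_eq_getElem hdl, e3, hrq]
      rfl

theorem pvRowPass_spec (fr fc sz : Nat) (Bm res : List (List Int)) (k : Nat)
    (hk : fr + k ≤ res.length) :
    (pvRowPass fr fc sz Bm res k).length = res.length ∧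
    (∀ p, (pvRowPass fr fc sz Bm res k).getD p []
      = if fr ≤ p ∧ p < fr + k then pvSplice (res.getD p []) (Bm.getD p []) fc sz
        else res.getD p []) := by
  induction k with
  | zero =>
    refine ⟨rfl, fun p => ?_⟩
    rw [if_neg (by omega)]; rfl
  | succ c ih =>
    obtain ⟨ih1, ih2⟩ := ih (by omega)
    have hM : pvRowPass fr fc sz Bm res (c + 1)
        = (pvRowPass fr fc sz Bm res c).set (fr + c)
            (pvSplice ((pvRowPass fr fc sz Bm res c).getD (fr + c) [])
              (Bm.getD (fr + c) []) fc sz) := by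
      rw [pvRowPass, List.range_succ, List.foldl_append, List.foldl_cons, List.foldl_nil]
      rfl
    have hval : (pvRowPass fr fc sz Bm res c).getD (fr + c) [] = res.getD (fr + c) [] := by
      rw [ih2, if_neg (by omega)]
    refine ⟨?_, ?_⟩
    · rw [hM, List.length_set, ih1]
    · intro p
      rw [hM, getD_set_list, hval, ih2]
      by_cases hp : p = fr + c
      · subst hp
        rw [if_pos ⟨rfl, by omega⟩, if_pos (by omega)]
      · rw [if_neg (by omega)]
        by_cases hin : fr ≤ p ∧ p < fr + c
        · rw [if_pos hin, if_pos (by omega)]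
        · rw [if_neg hin, if_neg (by omega)]

theorem map_take_getD (A : List (List Int)) (m p : Nat) :
    (A.map (fun r => r.take m)).getD p [] = (A.getD p []).take m := by
  rw [List.getD_eq_getElem?_getD, List.getD_eq_getElem?_getD, List.getElem?_map]
  cases h : A[p]? <;> simp

theorem take_getD (r : List Int) (m q : Nat) (hq : q < m) :
    (r.take m).getD q 0 = r.getD q 0 := by
  rw [List.getD_eq_getElem?_getD, List.getD_eq_getElem?_getD, List.getElem?_take_of_lt hq]

theorem base_eq (A : List (List Int)) :
    A.map (fun row => PySem.List.slice row none
      (some (if A.isEmpty then 0 else PySem.List.len (PySem.List.pyGetD A 0 ([] : List Int)))))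
    = A.map (fun r => r.take (A.headD []).length) := by
  cases A with
  | nil => rfl
  | cons a as =>
    have hw : (if (a :: as).isEmpty then (0 : Int)
        else PySem.List.len (PySem.List.pyGetD (a :: as) 0 ([] : List Int)))
        = (((a :: as).headD []).length : Int) := by
      simp [PySem.List.pyGetD_zero]
    rw [hw]
    refine List.map_congr_left ?_
    intro row _
    rw [PySem.List.slice_to_natCast]

-- B's port equals the entry-wise normal form, under Pre_
theorem Bport_eq_altSpec (A B : List (List Int)) (si : Int × Int) (size : Int)
    (hPre : Pre_MatAddPartial A B si size) :
    MatAddPartial_alt A B si size = altSpec A B si.1 si.2 size := by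
  obtain ⟨hRows, hBlk⟩ := hPre
  simp only [MatAddPartial_alt]
  rw [base_eq]
  set n := A.length with hn
  set m := (A.headD []).length with hm
  have hbase_row : ∀ p, ((A.map (fun r => r.take m)).getD p []) = (A.getD p []).take m :=
    fun p => map_take_getD A m p
  have hrowlen : ∀ p, p < n → ((A.getD p []).take m).length = m := by
    intro p hp
    have hmem : A.getD p [] ∈ A := by
      rw [List.getD_eq_getElem _ _ hp]; exact List.getElem_mem hp
    have := hRows _ hmem
    rw [List.length_take]
    omega
  by_cases hsz : size ≤ 0
  · rw [PySem.List.pyRange_one_eq_nil (by omega), List.foldl_nil, altSpec]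
    refine matrix_ext _ _ ?_ ?_ ?_
    · simp
    · intro p
      rw [hbase_row, alt_rowlen]
      by_cases hp : p < n
      · rw [if_pos hp, hrowlen p hp]
      · rw [if_neg hp, List.getD_eq_getElem?_getD, List.getElem?_eq_none (by simpa using hp)]
        simp
    · intro p q hp hq
      have hp' : p < n := by simpa using hp
      have hq' : q < m := by rw [hbase_row, hrowlen p hp'] at hq; exact hq
      rw [alt_entry _ n m p q hp' hq', if_neg (by omega), add_zero, pvG, hbase_row,
        take_getD _ _ _ hq']
      rfl
  · obtain ⟨hfr0, hfc0, hA1, hA2, hB1, hB2⟩ := hBlk.resolve_left hsz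
    set frN := si.1.toNat with hfrN
    set fcN := si.2.toNat with hfcN
    set szN := size.toNat with hszN
    have hfr : si.1 = ((frN : Nat) : Int) := by omega
    have hfc : si.2 = ((fcN : Nat) : Int) := by omega
    have hszc : size = ((szN : Nat) : Int) := by omega
    rw [hfr, hfc, hszc]
    have hrange : ((frN : Int) + (szN : Int)) = (((frN + szN : Nat) : Nat) : Int) := by
      push_cast; ring
    have hcol : ((fcN : Int) + (szN : Int)) = (((fcN + szN : Nat) : Nat) : Int) := by
      push_cast; ring
    rw [hrange, hcol, PySem.List.pyRange_one, List.foldl_map]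
    have hcnt : ((((frN + szN : Nat) : Int)) - (frN : Int)).toNat = szN := by omega
    rw [hcnt]
    refine Eq.trans (?_ : _ = pvRowPass frN fcN szN B (A.map (fun r => r.take m)) szN) ?_
    · rw [pvRowPass]
      refine List.foldl_ext _ _ _ ?_
      intro res k _
      have hcast : (frN : Int) + (k : Int) = ((frN + k : Nat) : Int) := by push_cast; ring
      rw [hcast]
      simp only [PySem.List.pyGetD_natCast, PySem.List.pySetD_natCast]
      rw [PySem.List.slice_to_natCast, PySem.List.slice_from_natCast,
        PySem.List.slice_natCast, PySem.List.slice_natCast,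
        show fcN + szN - fcN = szN by omega, pvSplice]
    obtain ⟨r1, r2⟩ := pvRowPass_spec frN fcN szN B (A.map (fun r => r.take m)) szN
      (by simp; omega)
    have hBrow : ∀ p, frN ≤ p → p < frN + szN → fcN + szN ≤ (B.getD p []).length := by
      intro p h1 h2
      have hpB : p < B.length := by omega
      have hmem : B.getD p [] ∈ (B.drop frN).take szN := by
        rw [List.getD_eq_getElem _ _ hpB]
        have : B[p] = ((B.drop frN).take szN)[p - frN]'(by simp; omega) := by
          rw [List.getElem_take, List.getElem_drop]
          congr 1; omega
        rw [this]
        exact List.getElem_mem _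
      have := hB2 _ hmem
      omega
    rw [altSpec]
    refine matrix_ext _ _ ?_ ?_ ?_
    · rw [r1]; simp
    · intro p
      rw [r2, alt_rowlen]
      by_cases hin : frN ≤ p ∧ p < frN + szN
      · rw [if_pos hin, pvSplice_length _ _ _ _
          (by rw [hbase_row, hrowlen p (by omega)]; omega)
          (hBrow p hin.1 hin.2),
          hbase_row, hrowlen p (by omega), if_pos (by omega)]
      · rw [if_neg hin, hbase_row]
        by_cases hp : p < n
        · rw [if_pos hp, hrowlen p hp]
        · rw [if_neg hp, List.getD_eq_getElem?_getD, List.getElem?_eq_none (by simpa using hp)]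
          simp
    · intro p q hp hq
      have hp' : p < n := by rw [r1] at hp; simpa using hp
      rw [pvG, r2]
      by_cases hin : frN ≤ p ∧ p < frN + szN
      · have hrl : ((A.map (fun r => r.take m)).getD p []).length = m := by
          rw [hbase_row, hrowlen p hp']
        have hq' : q < m := by
          rw [r2, if_pos hin, pvSplice_length _ _ _ _ (by rw [hrl]; omega)
            (hBrow p hin.1 hin.2), hrl] at hq
          exact hq
        rw [if_pos hin, pvSplice_getD _ _ _ _ (by rw [hrl]; omega) (hBrow p hin.1 hin.2)
          q (by rw [hrl]; omega)]
        rw [hbase_row, take_getD _ _ _ hq', alt_entry _ n m p q hp' hq']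
        have hA : (A.getD p []).getD q 0 = pvG A p q := rfl
        have hBv : (B.getD p []).getD q 0 = pvG B p q := rfl
        rw [hA, hBv]
        by_cases hcin : fcN ≤ q ∧ q < fcN + szN
        · rw [if_pos hcin, if_pos (by omega)]
        · rw [if_neg hcin, if_neg (by omega)]
      · have hq' : q < m := by
          rw [r2, if_neg hin, hbase_row, hrowlen p hp'] at hq
          exact hq
        rw [if_neg hin, hbase_row, take_getD _ _ _ hq', alt_entry _ n m p q hp' hq',
          if_neg (by omega), add_zero]
        rfl

-- ===== VERDICT (by name: the statement is the Claim_ definition above) =====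
theorem MatAddPartial_spec : Claim_equal_MatAddPartial := by
  intro A B si size _hDom hPre
  unfold Spec_MatAddPartial
  rw [Aport_eq_altSpec A B si size hPre, Bport_eq_altSpec A B si size hPre]
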